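-- pv_equiv track=rewrite | github.com/hamayoonk95/skill_extractor | ner_model_training/util.py | replace_aliases
-- ===== SOURCE A (Python) =====
-- def replace_aliases(description, aliases):
--     words = description.split()
--     i = 0
--     updated_words = []
--
--     special_chars = ",./-)("
--
--     while i < len(words):
--         longest_match = ""
--         replacement = ""
--
--         # Loop through all the aliases
--         for canonical, alias_list in aliases.items():
--             for alias in alias_list:
--                 alias_words = alias.split()
--
--                 # If there's a potential match
--                 if i + len(alias_words) <= len(words):
--                     match = True
--                     for j in range(len(alias_words)):
--                         if words[i + j].strip(special_chars).lower() != alias_words[j].lower():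
--                             match = False
--                             break
--
--                     # Replace with the longest matching canonical term
--                     if match and len(alias_words) > len(longest_match.split()):
--                         longest_match = alias
--                         replacement = canonical  # Not converting to lowercase here to maintain original format
--
--         # If we found a match, replace it
--         if longest_match:
--             updated_words.append(replacement)
--             i += len(longest_match.split())
--         else:
--             updated_words.append(words[i])
--             i += 1
--
--     return ' '.join(updated_words)
-- ===== SOURCE B (Python) =====
-- def replace_aliases(description, aliases):
--     words = description.split()
--     n = len(words)
--     special_chars = ",./-)("
--     stripped = [w.strip(special_chars).lower() for w in words]
--
--     # Index aliases by their first (lowercased) word, preserving scan order.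
--     index = {}
--     for canonical, alias_list in aliases.items():
--         for alias in alias_list:
--             aw = [w.lower() for w in alias.split()]
--             if aw:
--                 index.setdefault(aw[0], []).append((aw, canonical))
--
--     out = []
--     i = 0
--     while i < n:
--         best_len = 0
--         repl = ""
--         for aw, canonical in index.get(stripped[i], ()):
--             k = len(aw)
--             if k > best_len and i + k <= n and all(stripped[i + j] == aw[j] for j in range(1, k)):
--                 best_len = k
--                 repl = canonical
--         if best_len:
--             out.append(repl)
--             i += best_len
--         else:
--             out.append(words[i])
--             i += 1
--     return ' '.join(out)
-- ===== Notes on version B (the rewrite author's own statement) =====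
-- stated objective: faster
-- what changed: B builds a dict indexing aliases by their lowercased first word (and precomputes the stripped/lowercased words once), so each position only scans the few candidate aliases sharing its first word instead of scanning every alias and re-stripping words; tie/longest selection order is preserved.
import Mathlib
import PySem

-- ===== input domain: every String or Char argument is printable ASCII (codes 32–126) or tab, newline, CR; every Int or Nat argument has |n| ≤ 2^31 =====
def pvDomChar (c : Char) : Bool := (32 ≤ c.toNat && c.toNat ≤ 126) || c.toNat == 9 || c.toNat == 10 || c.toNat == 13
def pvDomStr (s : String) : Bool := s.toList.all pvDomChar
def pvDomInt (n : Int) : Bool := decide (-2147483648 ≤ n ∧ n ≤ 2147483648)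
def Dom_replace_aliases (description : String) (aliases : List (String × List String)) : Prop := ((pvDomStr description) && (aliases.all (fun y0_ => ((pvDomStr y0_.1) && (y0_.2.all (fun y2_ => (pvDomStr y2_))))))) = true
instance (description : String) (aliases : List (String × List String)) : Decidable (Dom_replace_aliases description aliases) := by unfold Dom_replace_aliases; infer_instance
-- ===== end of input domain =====

-- B replaces A's scan of EVERY alias at every word position by a first-word index
-- (dict: lowercased first alias word -> candidates) consulted only at matching positions,
-- with the stripped/lowercased words precomputed once.

-- shared constant: the special characters stripped from words (",./-)(")
def pvSC : String := ",./-)("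
-- w.strip(special_chars).lower()
def pvKey (w : String) : String := PySem.Str.lower (PySem.Str.stripChars w pvSC)

-- ===== PORT A =====
-- the inner j-loop of A: all alias words match the words at position i
def pvAMatch (words : List String) (i : Nat) (aw : List String) : Bool :=
  (List.range aw.length).all (fun j =>
    pvKey (words.getD (i + j) "") == PySem.Str.lower (aw.getD j ""))

-- A's body for one (canonical, alias) pair: update (longest_match, replacement)
def pvAStep (words : List String) (i : Nat) (st : String × String) (p : String × String) :
    String × String :=
  let aw := PySem.Str.split₀ p.2
  if i + aw.length ≤ words.length ∧ pvAMatch words i aw = true ∧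
      (PySem.Str.split₀ st.1).length < aw.length then
    (p.2, p.1)
  else st

-- A's double loop over aliases.items() and each alias_list
def pvABest (words : List String) (i : Nat) (aliases : List (String × List String)) :
    String × String :=
  (PySem.Dict.ofList aliases).items.foldl
    (fun st ca => ca.2.foldl (fun st a => pvAStep words i st (ca.1, a)) st) ("", "")

-- A's while loop (fuel = number of words; i advances by ≥ 1 per iteration)
def pvALoop (words : List String) (aliases : List (String × List String)) :
    Nat → Nat → List String → List String
  | 0, _, acc => acc
  | fuel + 1, i, acc =>
    if i < words.length then
      let best := pvABest words i aliases
      if best.1 ≠ "" then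
        pvALoop words aliases fuel (i + (PySem.Str.split₀ best.1).length) (acc ++ [best.2])
      else
        pvALoop words aliases fuel (i + 1) (acc ++ [words.getD i ""])
    else acc

def replace_aliases (description : String) (aliases : List (String × List String)) : String :=
  let words := PySem.Str.split₀ description
  PySem.Str.join " " (pvALoop words aliases words.length 0 [])

-- ===== PORT B =====
-- index: lowercased first alias word -> list of (lowercased alias words, canonical), scan order
def pvBIndex (aliases : List (String × List String)) :
    PySem.Dict String (List (List String × String)) :=
  (PySem.Dict.ofList aliases).items.foldl
    (fun d ca => ca.2.foldl (fun d a =>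
      match (PySem.Str.split₀ a).map PySem.Str.lower with
      | [] => d
      | a0 :: rest => d.modify a0 [] (· ++ [(a0 :: rest, ca.1)])) d)
    PySem.Dict.empty

-- B's body for one candidate (aw, canonical): update (best_len, repl)
def pvBStep (stripped : List String) (n i : Nat) (st : Nat × String) (c : List String × String) :
    Nat × String :=
  let k := c.1.length
  if st.1 < k ∧ i + k ≤ n ∧
      (List.range' 1 (k - 1)).all (fun j => stripped.getD (i + j) "" == c.1.getD j "") = true then
    (k, c.2)
  else st

-- B's while loop
def pvBLoop (words stripped : List String) (idx : PySem.Dict String (List (List String × String))) :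
    Nat → Nat → List String → List String
  | 0, _, acc => acc
  | fuel + 1, i, acc =>
    if i < words.length then
      let best := (idx.getD (stripped.getD i "") []).foldl
        (pvBStep stripped words.length i) (0, "")
      if best.1 ≠ 0 then
        pvBLoop words stripped idx fuel (i + best.1) (acc ++ [best.2])
      else
        pvBLoop words stripped idx fuel (i + 1) (acc ++ [words.getD i ""])
    else acc

def replace_aliases_alt (description : String) (aliases : List (String × List String)) : String :=
  let words := PySem.Str.split₀ description
  let stripped := words.map pvKey
  PySem.Str.join " " (pvBLoop words stripped (pvBIndex aliases) words.length 0 [])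

-- ===== PRECONDITION & SPEC =====
def Spec_replace_aliases (description : String) (aliases : List (String × List String)) (out : String) : Prop := out = replace_aliases_alt description aliases
instance (description : String) (aliases : List (String × List String)) (out : String) : Decidable (Spec_replace_aliases description aliases out) := by unfold Spec_replace_aliases; infer_instance

-- ===== CLAIM (what is proved, stated in full; the proofs are below) =====
def Claim_equal_replace_aliases : Prop := ∀ (description : String) (aliases : List (String × List String)), Dom_replace_aliases description aliases → Spec_replace_aliases description aliases (replace_aliases description aliases)

-- ===== LEMMAS AND PROOFS =====

-- the flattened (canonical, alias) pairs both loops scan, in order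
def pvPairs (aliases : List (String × List String)) : List (String × String) :=
  (PySem.Dict.ofList aliases).items.flatMap (fun ca => ca.2.map (fun a => (ca.1, a)))

-- the index entry one pair contributes (none if the alias has no words)
def pvToEntry (p : String × String) : Option (String × (List String × String)) :=
  match (PySem.Str.split₀ p.2).map PySem.Str.lower with
  | [] => none
  | a0 :: rest => some (a0, (a0 :: rest, p.1))

-- generic: a nested fold over items/alias_list is a flat fold over pvPairs-style pairs
theorem pv_nested_foldl {σ : Type} (f : σ → String × String → σ)
    (items : List (String × List String)) (init : σ) :
    items.foldl (fun s ca => ca.2.foldl (fun s a => f s (ca.1, a)) s) init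
      = (items.flatMap (fun ca => ca.2.map (fun a => (ca.1, a)))).foldl f init := by
  induction items generalizing init with
  | nil => rfl
  | cons ca rest ih =>
    simp only [List.flatMap_cons, List.foldl_append, List.foldl_cons, List.foldl_map, ih]

-- the index build is the modify-append fold over the entries of the pairs
theorem pv_index_fold (ps : List (String × String))
    (d : PySem.Dict String (List (List String × String))) :
    ps.foldl (fun d p =>
        match (PySem.Str.split₀ p.2).map PySem.Str.lower with
        | [] => d
        | a0 :: rest => d.modify a0 [] (· ++ [(a0 :: rest, p.1)])) d
      = (ps.filterMap pvToEntry).foldl (fun d e => d.modify e.1 [] (· ++ [e.2])) d := by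
  induction ps generalizing d with
  | nil => rfl
  | cons p rest ih =>
    rw [List.foldl_cons, List.filterMap_cons]
    cases h : (PySem.Str.split₀ p.2).map PySem.Str.lower with
    | nil =>
      have hE : pvToEntry p = none := by simp [pvToEntry, h]
      rw [hE]
      show List.foldl _ d rest = _
      exact ih d
    | cons a0 r =>
      have hE : pvToEntry p = some (a0, (a0 :: r, p.1)) := by simp [pvToEntry, h]
      rw [hE]
      show List.foldl _ (d.modify a0 [] (· ++ [(a0 :: r, p.1)])) rest = _
      rw [List.foldl_cons]
      exact ih _

-- getD of a mapped list at an in-range position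
theorem pv_getD_map {α β : Type} (f : α → β) (l : List α) (n : Nat) (hn : n < l.length)
    (dα : α) (dβ : β) : (l.map f).getD n dβ = f (l.getD n dα) := by
  simp [List.getD_eq_getElem?_getD, List.getElem?_map, List.getElem?_eq_getElem hn]

-- what the index holds at one key
theorem pv_index_getD (aliases : List (String × List String)) (key : String) :
    (pvBIndex aliases).getD key []
      = (((pvPairs aliases).filterMap pvToEntry).filter (fun e => e.1 == key)).map (·.2) := by
  have h1 : pvBIndex aliases
      = (pvPairs aliases).foldl (fun d p =>
          match (PySem.Str.split₀ p.2).map PySem.Str.lower with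
          | [] => d
          | a0 :: rest => d.modify a0 [] (· ++ [(a0 :: rest, p.1)])) PySem.Dict.empty := by
    unfold pvBIndex pvPairs
    exact pv_nested_foldl (fun (d : PySem.Dict String (List (List String × String))) (p : String × String) =>
      match (PySem.Str.split₀ p.2).map PySem.Str.lower with
      | [] => d
      | a0 :: rest => d.modify a0 [] (· ++ [(a0 :: rest, p.1)])) _ _
  rw [h1, pv_index_fold, PySem.Dict.getD_foldl_modify_append]
  simp [PySem.Dict.getD_empty]

-- relation between A's state (longest_match, replacement) and B's (best_len, repl)
def pvRel (st : String × String) (stB : Nat × String) : Prop :=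
  stB.1 = (PySem.Str.split₀ st.1).length ∧ (stB.1 ≠ 0 → stB.2 = st.2) ∧
    (st.1 = "" ∨ (PySem.Str.split₀ st.1).length ≠ 0)

-- core: A's fold over the pairs matches B's fold over the key's bucket
theorem pv_fold_rel (words : List String) (i : Nat) (hi : i < words.length)
    (ps : List (String × String)) (st : String × String) (stB : Nat × String)
    (hrel : pvRel st stB) :
    pvRel (ps.foldl (pvAStep words i) st)
      (((((ps.filterMap pvToEntry).filter
            (fun e => e.1 == (words.map pvKey).getD i ""))).map (·.2)).foldl
        (pvBStep (words.map pvKey) words.length i) stB) := by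
  induction ps generalizing st stB with
  | nil => exact hrel
  | cons p rest ih =>
    have hkey : (words.map pvKey).getD i "" = pvKey (words.getD i "") :=
      pv_getD_map pvKey words i hi "" ""
    cases hmap : (PySem.Str.split₀ p.2).map PySem.Str.lower with
    | nil =>
      have hE : pvToEntry p = none := by simp [pvToEntry, hmap]
      have hsp : PySem.Str.split₀ p.2 = [] := by
        have := congrArg List.length hmap
        simpa using List.eq_nil_of_length_eq_zero (by simpa using this)
      have hA : pvAStep words i st p = st := by
        simp [pvAStep, hsp]
      simp only [List.foldl_cons, List.filterMap_cons, hE, hA]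
      exact ih st stB hrel
    | cons a0 r =>
      have hE : pvToEntry p = some (a0, (a0 :: r, p.1)) := by simp [pvToEntry, hmap]
      have hk : (PySem.Str.split₀ p.2).length = r.length + 1 := by
        have := congrArg List.length hmap
        simpa using this
      -- the per-word comparison in A equals the one in B (for j in range)
      have hcmp : ∀ j, j < (PySem.Str.split₀ p.2).length → i + j < words.length →
          ((words.map pvKey).getD (i + j) "" == (a0 :: r).getD j "")
            = (pvKey (words.getD (i + j) "") == PySem.Str.lower ((PySem.Str.split₀ p.2).getD j "")) := by
        intro j hj hij
        rw [pv_getD_map pvKey words (i + j) hij "" "", ← hmap,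
          pv_getD_map PySem.Str.lower (PySem.Str.split₀ p.2) j hj ""]
      simp only [List.foldl_cons, List.filterMap_cons, hE, List.filter_cons]
      by_cases hb : (a0 == (words.map pvKey).getD i "") = true
      · -- in the bucket: both sides take a step
        simp only [hb, if_pos, List.map_cons, List.foldl_cons]
        have hkeyeq : pvKey (words.getD i "") = a0 := by
          rw [← hkey]; exact (beq_iff_eq.mp hb).symm
        have hstep : pvRel (pvAStep words i st p)
            (pvBStep (words.map pvKey) words.length i stB (a0 :: r, p.1)) := by
          unfold pvAStep pvBStep
          simp only
          by_cases hg : i + (PySem.Str.split₀ p.2).length ≤ words.length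
          · -- guard holds: the match tests are equivalent
            have hmm : pvAMatch words i (PySem.Str.split₀ p.2) = true ↔
                ((List.range' 1 ((a0 :: r).length - 1)).all
                  (fun j => (words.map pvKey).getD (i + j) "" == (a0 :: r).getD j "")) = true := by
              unfold pvAMatch
              simp only [List.all_eq_true, List.length_cons, Nat.add_sub_cancel]
              constructor
              · intro h j hj
                have hj' := List.mem_range'_1.mp hj
                have hjlt : j < (PySem.Str.split₀ p.2).length := by omega
                rw [hcmp j hjlt (by omega)]
                exact h j (List.mem_range.mpr hjlt)
              · intro h j hj
                have hjlt := List.mem_range.mp hj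
                rcases Nat.eq_zero_or_pos j with h0 | hpos
                · subst h0
                  have haw0 : PySem.Str.lower ((PySem.Str.split₀ p.2).getD 0 "") = a0 := by
                    rw [← pv_getD_map PySem.Str.lower (PySem.Str.split₀ p.2) 0 (by omega) "" "",
                      hmap]; rfl
                  simp only [Nat.add_zero, haw0, hkeyeq]
                  exact beq_iff_eq.mpr rfl
                · have := h j (List.mem_range'_1.mpr ⟨by omega, by omega⟩)
                  rw [hcmp j hjlt (by omega)] at this
                  exact this
            by_cases hm : pvAMatch words i (PySem.Str.split₀ p.2) = true
            · by_cases hl : (PySem.Str.split₀ st.1).length < (PySem.Str.split₀ p.2).length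
              · rw [if_pos ⟨hg, hm, hl⟩, if_pos]
                · refine ⟨by simp [hk], fun _ => rfl, Or.inr ?_⟩
                  simp only [hk]; omega
                · refine ⟨by rw [hrel.1, List.length_cons, hk] at *; omega,
                    by rw [List.length_cons, ← hk]; exact hg, hmm.mp hm⟩
              · rw [if_neg (by tauto), if_neg]
                · exact hrel
                · rw [hrel.1, List.length_cons, ← hk]; tauto
            · rw [if_neg (by tauto), if_neg]
              · exact hrel
              · rintro ⟨-, -, h3⟩
                exact hm (hmm.mpr h3)
          · rw [if_neg (by tauto), if_neg]
            · exact hrel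
            · rw [List.length_cons, ← hk]; tauto
        exact ih _ _ hstep
      · -- not in the bucket: A's match fails at j = 0
        simp only [hb, if_neg, Bool.false_eq_true, not_false_eq_true]
        have hA : pvAStep words i st p = st := by
          unfold pvAStep
          simp only
          rw [if_neg]
          rintro ⟨hg, hm, -⟩
          unfold pvAMatch at hm
          rw [List.all_eq_true] at hm
          have h0 := hm 0 (List.mem_range.mpr (by omega))
          have haw0 : PySem.Str.lower ((PySem.Str.split₀ p.2).getD 0 "") = a0 := by
            rw [← pv_getD_map PySem.Str.lower (PySem.Str.split₀ p.2) 0 (by omega) "" "", hmap]; rfl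
          simp only [Nat.add_zero, haw0, ← hkey] at h0
          exact hb (by rw [beq_iff_eq] at h0 ⊢; exact h0.symm)
        rw [hA]
        exact ih st stB hrel

-- the two while loops agree step by step
theorem pv_loop_eq (words : List String) (aliases : List (String × List String)) :
    ∀ (fuel i : Nat) (acc : List String),
      pvALoop words aliases fuel i acc
        = pvBLoop words (words.map pvKey) (pvBIndex aliases) fuel i acc := by
  intro fuel
  induction fuel with
  | zero => intro i acc; rfl
  | succ f ih =>
    intro i acc
    unfold pvALoop pvBLoop
    by_cases hi : i < words.length
    · simp only [if_pos hi]
      have hinit : pvRel ("", "") (0, "") := ⟨by decide, by simp, Or.inl rfl⟩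
      have hrel := pv_fold_rel words i hi (pvPairs aliases) ("", "") (0, "") hinit
      rw [← pv_index_getD aliases ((words.map pvKey).getD i "")] at hrel
      have hABest : pvABest words i aliases = (pvPairs aliases).foldl (pvAStep words i) ("", "") := by
        unfold pvABest pvPairs
        exact pv_nested_foldl (pvAStep words i) _ _
      set bA := (pvPairs aliases).foldl (pvAStep words i) ("", "") with hbA
      set bB := ((pvBIndex aliases).getD ((words.map pvKey).getD i "") []).foldl
        (pvBStep (words.map pvKey) words.length i) (0, "") with hbB
      obtain ⟨h1, h2, h3⟩ := hrel
      by_cases hz : bA.1 = ""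
      · have hlen0 : bB.1 = 0 := by rw [h1, hz]; decide
        simp only [hABest, hz, hlen0, ne_eq, not_true_eq_false, if_false]
        exact ih _ _
      · have hlen : bB.1 ≠ 0 := by
          rw [h1]; rcases h3 with h | h
          · exact absurd h hz
          · exact h
        simp only [hABest, hz, hlen, ne_eq, not_false_eq_true, if_true]
        rw [h1, h2 hlen]
        exact ih _ _
    · simp [hi]

-- ===== VERDICT (by name: the statement is the Claim_ definition above) =====
theorem replace_aliases_spec : Claim_equal_replace_aliases := by
  intro description aliases _
  unfold Spec_replace_aliases replace_aliases replace_aliases_alt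
  simp only
  rw [pv_loop_eq]
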